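-- pv_equiv track=rewrite | github.com/dan-mk/portugol-coral | tradutor/analise_sintatica.py | fixSymbolTable
-- ===== SOURCE A (Python) =====
-- def fixSymbolTable(symbolTable):
-- 	tokenPos = 0
-- 	while tokenPos < len(symbolTable):
-- 		if symbolTable[tokenPos][0] == '}':
-- 			tokenPos += 1
-- 			tokenPosN = tokenPos
-- 			while symbolTable[tokenPos][0] == '\\n':
-- 				tokenPos += 1
-- 			if symbolTable[tokenPos][0] in ['senao_se', 'senao']:
-- 				while symbolTable[tokenPosN][0] == '\\n':
-- 					symbolTable.pop(tokenPosN)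
-- 				tokenPos = tokenPosN
-- 			tokenPos -= 1
-- 		tokenPos += 1
-- 	return symbolTable
-- ===== SOURCE B (Python) =====
-- # B: single-pass stack rebuild into a NEW list (A mutates its argument in place; B does not --
-- # the equivalence claimed is about the return value).
-- def fixSymbolTable(symbolTable):
-- 	stack = symbolTable[::-1]
-- 	out = []
-- 	while stack:
-- 		row = stack.pop()
-- 		out.append(row)
-- 		if row[0] == '}':
-- 			nl = []
-- 			while stack[-1][0] == '\\n':
-- 				nl.append(stack.pop())
-- 			if stack[-1][0] not in ('senao_se', 'senao'):
-- 				out.extend(nl)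
-- 	return out
-- ===== Notes on version B (the rewrite author's own statement) =====
-- stated objective: alternative
-- what changed: B rebuilds the token table in one left-to-right pass over a stack into a new output list (dropping a newline run after '}' only when the next real token is senao/senao_se), instead of A's index-driven rescan with repeated in-place list.pop(i); equivalence is about the return value (A mutates its argument, B does not).
import Mathlib
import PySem

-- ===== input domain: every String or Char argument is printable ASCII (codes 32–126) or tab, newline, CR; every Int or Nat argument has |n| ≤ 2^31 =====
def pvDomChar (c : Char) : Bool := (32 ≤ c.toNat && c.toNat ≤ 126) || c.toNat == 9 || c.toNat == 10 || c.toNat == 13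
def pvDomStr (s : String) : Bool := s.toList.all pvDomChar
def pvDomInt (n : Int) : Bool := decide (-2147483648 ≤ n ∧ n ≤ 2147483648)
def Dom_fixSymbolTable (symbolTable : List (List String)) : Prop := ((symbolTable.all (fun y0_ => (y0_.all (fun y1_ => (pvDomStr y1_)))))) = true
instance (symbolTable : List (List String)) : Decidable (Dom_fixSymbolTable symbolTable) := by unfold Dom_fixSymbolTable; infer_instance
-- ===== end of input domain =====

-- B rebuilds the table in one left-to-right pass into a NEW list instead of A's in-place
-- index scan with repeated pop(i); A mutates its argument, B does not — the equivalence
-- proved here is about the RETURN value only.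

-- ===== PORT A =====
-- first token of row i (rows are non-empty and i is in range on Pre_; "" is the
-- out-of-range placeholder where Python would raise IndexError)
def hdAt (st : List (List String)) (i : Nat) : String := (st.getD i []).headD ""

-- inner `while symbolTable[tokenPos][0] == '\\n': tokenPos += 1` (the bound only makes the
-- recursion total; Python raises exactly where the bound bites, and Pre_ excludes those inputs)
def scanNl (st : List (List String)) (i : Nat) : Nat :=
  if _h : i < st.length ∧ hdAt st i = "\\n" then scanNl st (i + 1) else i
termination_by st.length - i
decreasing_by omega

-- inner `while symbolTable[tokenPosN][0] == '\\n': symbolTable.pop(tokenPosN)`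
def popNl (st : List (List String)) (i : Nat) : List (List String) :=
  if h : i < st.length ∧ hdAt st i = "\\n" then popNl (st.eraseIdx i) i else st
termination_by st.length
decreasing_by rw [List.length_eraseIdx, if_pos h.1]; omega

theorem scanNl_ge (st : List (List String)) (i : Nat) : i ≤ scanNl st i := by
  unfold scanNl
  split
  · exact Nat.le_trans (Nat.le_succ i) (scanNl_ge st (i + 1))
  · exact Nat.le_refl i
termination_by st.length - i
decreasing_by omega

theorem popNl_length_le (st : List (List String)) (i : Nat) : (popNl st i).length ≤ st.length := by
  rw [popNl]
  split
  · rename_i h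
    have h1 := h.1
    have h2 := popNl_length_le (st.eraseIdx i) i
    have h3 : (st.eraseIdx i).length = st.length - 1 := by
      rw [List.length_eraseIdx, if_pos h1]
    omega
  · exact Nat.le_refl _
termination_by st.length
decreasing_by rw [List.length_eraseIdx, if_pos h1]; omega

-- A's outer `while tokenPos < len(symbolTable)` loop, mutation and all
-- (after the '}' branch Python does `tokenPos -= 1; tokenPos += 1`, i.e. continues at the scan result)
def fixA_loop (st : List (List String)) (pos : Nat) : List (List String) :=
  if h : pos < st.length then
    if hdAt st pos = "}" then
      if hdAt st (scanNl st (pos + 1)) = "senao_se" ∨ hdAt st (scanNl st (pos + 1)) = "senao" then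
        fixA_loop (popNl st (pos + 1)) (pos + 1)
      else
        fixA_loop st (scanNl st (pos + 1))
    else fixA_loop st (pos + 1)
  else st
termination_by st.length - pos
decreasing_by
  · have := popNl_length_le st (pos + 1); omega
  · have := scanNl_ge st (pos + 1); omega
  · omega

def fixSymbolTable (symbolTable : List (List String)) : List (List String) :=
  fixA_loop symbolTable 0

-- ===== PORT B =====
-- Source B works on `stack = symbolTable[::-1]`, popping from the END; the port models the
-- stack as a forward list whose head is the top of the stack (pop = uncons), which yields
-- the same sequence of popped values.
def headTok (row : List String) : String := row.headD ""

-- Source B's `while stack[-1][0] == '\\n': nl.append(stack.pop())`: returns (nl, remaining stack)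
def splitRun (stack : List (List String)) : List (List String) × List (List String) :=
  match stack with
  | [] => ([], [])
  | row :: rest =>
    if headTok row = "\\n" then
      ((row :: (splitRun rest).1), (splitRun rest).2)
    else ([], row :: rest)

theorem splitRun_snd_length_le (stack : List (List String)) : (splitRun stack).2.length ≤ stack.length := by
  induction stack with
  | nil => simp [splitRun]
  | cons row rest ih =>
    simp only [splitRun]
    split
    · exact Nat.le_trans ih (Nat.le_succ _)
    · simp

-- Source B's `while stack:` loop, accumulating `out`
def fixB_loop (stack out : List (List String)) : List (List String) :=
  match stack with
  | [] => out
  | row :: rest =>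
    if headTok row = "}" then
      if headTok ((splitRun rest).2.headD []) = "senao_se" ∨ headTok ((splitRun rest).2.headD []) = "senao" then
        fixB_loop (splitRun rest).2 (out ++ [row])
      else
        fixB_loop (splitRun rest).2 (out ++ [row] ++ (splitRun rest).1)
    else fixB_loop rest (out ++ [row])
termination_by stack.length
decreasing_by
  · have := splitRun_snd_length_le rest; simp; omega
  · have := splitRun_snd_length_le rest; simp; omega
  · simp

def fixSymbolTable_alt (symbolTable : List (List String)) : List (List String) :=
  fixB_loop symbolTable []

-- ===== PRECONDITION & SPEC =====
-- Pre_ excludes exactly the inputs on which the Python A raises IndexError: a row with no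
-- tokens, or a '}' row followed (to the end of the table) only by '\n' rows, so that the
-- scan past the '}' runs off the end.
def Pre_fixSymbolTable (symbolTable : List (List String)) : Prop :=
  (∀ row ∈ symbolTable, row ≠ []) ∧
  (∀ i < symbolTable.length, (symbolTable.getD i []).headD "" = "}" →
    ∃ r ∈ symbolTable.drop (i + 1), r.headD "" ≠ "\\n")
instance (symbolTable : List (List String)) : Decidable (Pre_fixSymbolTable symbolTable) := by
  unfold Pre_fixSymbolTable; infer_instance

def pvWitness_fixSymbolTable : List (List String) :=
  [["{"], ["}"], ["\\n"], ["senao"], ["x", "1"]]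

def Spec_fixSymbolTable (symbolTable : List (List String)) (out : List (List String)) : Prop := out = fixSymbolTable_alt symbolTable
instance (symbolTable : List (List String)) (out : List (List String)) : Decidable (Spec_fixSymbolTable symbolTable out) := by unfold Spec_fixSymbolTable; infer_instance

-- ===== CLAIM (what is proved, stated in full; the proofs are below) =====
def Claim_equal_fixSymbolTable : Prop := ∀ (symbolTable : List (List String)), Dom_fixSymbolTable symbolTable → Pre_fixSymbolTable symbolTable → Spec_fixSymbolTable symbolTable (fixSymbolTable symbolTable)

-- ===== LEMMAS AND PROOFS =====

theorem hdAt_boundary (a b : List (List String)) :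
    hdAt (a ++ b) a.length = headTok (b.headD []) := by
  simp only [hdAt, headTok, List.getD,
    List.getElem?_append_right (Nat.le_refl a.length), Nat.sub_self]
  cases b <;> simp

theorem splitRun_spec (stack : List (List String)) :
    stack = (splitRun stack).1 ++ (splitRun stack).2 ∧
    (∀ x ∈ (splitRun stack).1, headTok x = "\\n") ∧
    ((splitRun stack).2 = [] ∨ headTok ((splitRun stack).2.headD []) ≠ "\\n") := by
  induction stack with
  | nil => simp [splitRun]
  | cons row rest ih =>
    simp only [splitRun]
    split
    · rename_i h
      refine ⟨by simpa using ih.1, ?_, by simpa using ih.2.2⟩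
      intro x hx
      rcases List.mem_cons.mp hx with h1 | h2
      · simpa [h1] using h
      · exact ih.2.1 x h2
    · rename_i h
      exact ⟨by simp, by simp, Or.inr (by simpa [headTok] using h)⟩

theorem scanNl_run (nl : List (List String)) : ∀ (rest' done : List (List String)),
    (∀ x ∈ nl, headTok x = "\\n") →
    (rest' = [] ∨ headTok (rest'.headD []) ≠ "\\n") →
    scanNl (done ++ nl ++ rest') done.length = done.length + nl.length := by
  induction nl with
  | nil =>
    intro rest' done _ hr
    rw [scanNl]
    rw [dif_neg]
    · simp
    · rintro ⟨hlt, h2⟩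
      have e : done ++ ([] : List (List String)) ++ rest' = done ++ rest' := by simp
      rw [e, hdAt_boundary] at h2
      rcases hr with h | h
      · subst h; simp at hlt
      · exact h h2
  | cons x nl2 ih =>
    intro rest' done hnl hr
    rw [scanNl]
    rw [dif_pos]
    · have e1 : done ++ (x :: nl2) ++ rest' = (done ++ [x]) ++ nl2 ++ rest' := by simp
      have e2 : done.length + 1 = (done ++ [x]).length := by simp
      rw [e1, e2, ih rest' (done ++ [x]) (fun y hy => hnl y (List.mem_cons_of_mem x hy)) hr]
      simp
      omega
    · constructor
      · simp
      · have e : done ++ (x :: nl2) ++ rest' = done ++ (x :: (nl2 ++ rest')) := by simp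
        rw [e, hdAt_boundary]
        simpa using hnl x List.mem_cons_self

theorem eraseIdx_append_length (a : List (List String)) (x : List String) (b : List (List String)) :
    (a ++ x :: b).eraseIdx a.length = a ++ b := by
  induction a with
  | nil => simp
  | cons y ys ih => simp [ih]

theorem popNl_run (nl : List (List String)) : ∀ (rest' done : List (List String)),
    (∀ x ∈ nl, headTok x = "\\n") →
    (rest' = [] ∨ headTok (rest'.headD []) ≠ "\\n") →
    popNl (done ++ nl ++ rest') done.length = done ++ rest' := by
  induction nl with
  | nil =>
    intro rest' done _ hr
    rw [popNl]
    rw [dif_neg]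
    · simp
    · rintro ⟨hlt, h2⟩
      have e : done ++ ([] : List (List String)) ++ rest' = done ++ rest' := by simp
      rw [e, hdAt_boundary] at h2
      rcases hr with h | h
      · subst h; simp at hlt
      · exact h h2
  | cons x nl2 ih =>
    intro rest' done hnl hr
    rw [popNl]
    rw [dif_pos]
    · have he : (done ++ (x :: nl2) ++ rest').eraseIdx done.length = done ++ nl2 ++ rest' := by
        have e : done ++ (x :: nl2) ++ rest' = done ++ x :: (nl2 ++ rest') := by simp
        rw [e, eraseIdx_append_length]; simp
      rw [he, ih rest' done (fun y hy => hnl y (List.mem_cons_of_mem x hy)) hr]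
    · constructor
      · simp
      · have e : done ++ (x :: nl2) ++ rest' = done ++ (x :: (nl2 ++ rest')) := by simp
        rw [e, hdAt_boundary]
        simpa using hnl x List.mem_cons_self

theorem fixB_loop_acc (n : Nat) : ∀ (stack out : List (List String)), stack.length ≤ n →
    fixB_loop stack out = out ++ fixB_loop stack [] := by
  induction n with
  | zero =>
    intro stack out h
    have : stack = [] := List.eq_nil_of_length_eq_zero (Nat.le_zero.mp h)
    subst this
    simp [fixB_loop]
  | succ n ih =>
    intro stack out h
    cases stack with
    | nil => simp [fixB_loop]
    | cons row rest =>
      have hlen : rest.length ≤ n := by simpa using h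
      have hlen2 : (splitRun rest).2.length ≤ n := Nat.le_trans (splitRun_snd_length_le rest) hlen
      rw [fixB_loop, fixB_loop]
      by_cases hbr : headTok row = "}"
      · rw [if_pos hbr, if_pos hbr]
        by_cases hs : headTok ((splitRun rest).2.headD []) = "senao_se" ∨ headTok ((splitRun rest).2.headD []) = "senao"
        · rw [if_pos hs, if_pos hs, ih (splitRun rest).2 (out ++ [row]) hlen2,
              ih (splitRun rest).2 ([] ++ [row]) hlen2]
          simp
        · rw [if_neg hs, if_neg hs, ih (splitRun rest).2 (out ++ [row] ++ (splitRun rest).1) hlen2,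
              ih (splitRun rest).2 ([] ++ [row] ++ (splitRun rest).1) hlen2]
          simp
      · rw [if_neg hbr, if_neg hbr, ih rest (out ++ [row]) hlen, ih rest ([] ++ [row]) hlen]
        simp

theorem fixA_eq_fixB (n : Nat) : ∀ (rest done : List (List String)), rest.length ≤ n →
    fixA_loop (done ++ rest) done.length = done ++ fixB_loop rest [] := by
  induction n with
  | zero =>
    intro rest done h
    have : rest = [] := List.eq_nil_of_length_eq_zero (Nat.le_zero.mp h)
    subst this
    rw [fixA_loop, fixB_loop]
    simp
  | succ n ih =>
    intro rest done h
    cases rest with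
    | nil =>
      rw [fixA_loop, fixB_loop]; simp
    | cons row rest2 =>
      have hlen2 : rest2.length ≤ n := by simpa using h
      have hpos : done.length < (done ++ row :: rest2).length := by simp
      have hb : hdAt (done ++ row :: rest2) done.length = headTok row := by
        rw [hdAt_boundary]; simp
      rw [fixA_loop, dif_pos hpos, hb]
      obtain ⟨hsplit, hnl, hr⟩ := splitRun_spec rest2
      have hlenr : (splitRun rest2).2.length ≤ n := Nat.le_trans (splitRun_snd_length_le rest2) hlen2
      by_cases hbr : headTok row = "}"
      · rw [if_pos hbr]
        have harr : done ++ row :: rest2 = (done ++ [row]) ++ (splitRun rest2).1 ++ (splitRun rest2).2 := by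
          conv_lhs => rw [hsplit]
          simp
        have hlen1 : done.length + 1 = (done ++ [row]).length := by simp
        have hscan : scanNl (done ++ row :: rest2) (done.length + 1)
            = done.length + 1 + (splitRun rest2).1.length := by
          conv_lhs => rw [harr, hlen1,
            scanNl_run (splitRun rest2).1 (splitRun rest2).2 (done ++ [row]) hnl hr]
          simp
        have hjhd : hdAt (done ++ row :: rest2) (done.length + 1 + (splitRun rest2).1.length)
            = headTok ((splitRun rest2).2.headD []) := by
          have e : done.length + 1 + (splitRun rest2).1.length
              = ((done ++ [row]) ++ (splitRun rest2).1).length := by simp; omega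
          rw [e, harr, hdAt_boundary]
        rw [hscan, hjhd, fixB_loop, if_pos hbr]
        by_cases hsen : headTok ((splitRun rest2).2.headD []) = "senao_se" ∨ headTok ((splitRun rest2).2.headD []) = "senao"
        · rw [if_pos hsen, if_pos hsen]
          have hpop : popNl (done ++ row :: rest2) (done.length + 1) = (done ++ [row]) ++ (splitRun rest2).2 := by
            conv_lhs => rw [harr, hlen1,
              popNl_run (splitRun rest2).1 (splitRun rest2).2 (done ++ [row]) hnl hr]
          rw [hpop, hlen1, ih (splitRun rest2).2 (done ++ [row]) hlenr,
              fixB_loop_acc n (splitRun rest2).2 ([] ++ [row]) hlenr]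
          simp
        · rw [if_neg hsen, if_neg hsen]
          have e : done.length + 1 + (splitRun rest2).1.length
              = ((done ++ [row]) ++ (splitRun rest2).1).length := by simp; omega
          rw [e, harr, ih (splitRun rest2).2 ((done ++ [row]) ++ (splitRun rest2).1) hlenr,
              fixB_loop_acc n (splitRun rest2).2 ([] ++ [row] ++ (splitRun rest2).1) hlenr]
          simp
      · rw [if_neg hbr, fixB_loop, if_neg hbr]
        have harr : done ++ row :: rest2 = (done ++ [row]) ++ rest2 := by simp
        have hlen1 : done.length + 1 = (done ++ [row]).length := by simp
        rw [harr, hlen1, ih rest2 (done ++ [row]) hlen2,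
            fixB_loop_acc n rest2 ([] ++ [row]) hlen2]
        simp

-- ===== VERDICT (by name: the statement is the Claim_ definition above) =====
theorem fixSymbolTable_spec : Claim_equal_fixSymbolTable := by
  intro st _ _
  unfold Spec_fixSymbolTable fixSymbolTable fixSymbolTable_alt
  have := fixA_eq_fixB st.length st [] (Nat.le_refl _)
  simpa using this
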